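-- pv_equiv track=rewrite | github.com/william-156/AptaMotif1.1 | structure_analysis.py | _extract_stems
-- ===== SOURCE A (Python) =====
-- def _extract_stems(structure, min_length=3):
--     """Extract stem regions (consecutive base pairs)."""
--     stems = []
--     current_stem = 0
--
--     for char in structure:
--         if char == '(':
--             current_stem += 1
--         elif char == ')':
--             if current_stem >= min_length:
--                 stems.append(current_stem)
--             current_stem = 0
--         else:
--             if current_stem >= min_length:
--                 stems.append(current_stem)
--             current_stem = 0
--
--     if current_stem >= min_length:
--         stems.append(current_stem)
--
--     return stems
-- ===== SOURCE B (Python) =====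
-- import re
--
-- def _extract_stems(structure, min_length=3):
--     """Extract stem regions (consecutive base pairs)."""
--     segments = re.split(r'[^(]', structure)
--     return [len(seg) for seg in segments if len(seg) >= min_length]
-- ===== Notes on version B (the rewrite author's own statement) =====
-- stated objective: idiomatic
-- what changed: Replaced the character-by-character accumulator/reset state machine with a regex split on every non-open-paren character, which yields all (possibly empty) maximal open-paren segments, followed by a comprehension keeping the lengths at or above the threshold.
import Mathlib
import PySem

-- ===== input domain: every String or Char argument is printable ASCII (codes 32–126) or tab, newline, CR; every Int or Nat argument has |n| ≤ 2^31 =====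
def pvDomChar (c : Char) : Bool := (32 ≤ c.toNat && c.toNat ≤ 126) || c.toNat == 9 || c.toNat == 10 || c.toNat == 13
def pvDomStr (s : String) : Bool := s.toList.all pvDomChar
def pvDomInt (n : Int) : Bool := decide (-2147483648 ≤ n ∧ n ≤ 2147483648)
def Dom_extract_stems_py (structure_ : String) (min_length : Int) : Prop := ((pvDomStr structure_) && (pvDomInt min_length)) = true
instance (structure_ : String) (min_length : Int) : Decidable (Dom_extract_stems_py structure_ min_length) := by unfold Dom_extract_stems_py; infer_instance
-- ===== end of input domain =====

-- B replaces A's accumulator/reset state machine by a regex split into '('-segments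
-- plus a filtering comprehension (idiomatic decomposition, same O(n) cost).


-- ===== PORT A =====
-- one loop step of A: branch order as in the Python (== '(', elif == ')', else)
def extractStemsStepA (min_length : Int) (st : List Int × Int) (c : Char) : List Int × Int :=
  if c = '(' then (st.1, st.2 + 1)
  else if c = ')' then ((if st.2 ≥ min_length then st.1 ++ [st.2] else st.1), 0)
  else ((if st.2 ≥ min_length then st.1 ++ [st.2] else st.1), 0)

def extract_stems_py (structure_ : String) (min_length : Int) : List Int :=
  let st := structure_.toList.foldl (extractStemsStepA min_length) ([], 0)
  if st.2 ≥ min_length then st.1 ++ [st.2] else st.1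

-- ===== PORT B =====
-- hand port of re.split(r'[^(]', structure): every non-'(' char is a separator;
-- consecutive separators (and separators at the ends) give empty segments, as re.split does.
def extractStemsSplit : List Char → List (List Char)
  | [] => [[]]
  | c :: cs =>
    if c = '(' then
      match extractStemsSplit cs with
      | seg :: rest => (c :: seg) :: rest
      | [] => [[c]]
    else [] :: extractStemsSplit cs

def extract_stems_py_alt (structure_ : String) (min_length : Int) : List Int :=
  (((extractStemsSplit structure_.toList).filter
      (fun seg => min_length ≤ (seg.length : Int))).map
    (fun seg => (seg.length : Int)))

-- ===== PRECONDITION & SPEC =====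
def Spec_extract_stems_py (structure_ : String) (min_length : Int) (out : List Int) : Prop := out = extract_stems_py_alt structure_ min_length
instance (structure_ : String) (min_length : Int) (out : List Int) : Decidable (Spec_extract_stems_py structure_ min_length out) := by unfold Spec_extract_stems_py; infer_instance

-- ===== CLAIM (what is proved, stated in full; the proofs are below) =====
def Claim_equal_extract_stems_py : Prop := ∀ (structure_ : String) (min_length : Int), Dom_extract_stems_py structure_ min_length → Spec_extract_stems_py structure_ min_length (extract_stems_py structure_ min_length)

-- ===== LEMMAS AND PROOFS =====

-- A's loop body followed by its final flush, as one function of the remaining input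
def extractStemsFinishA (min_length : Int) (stems : List Int) (cur : Int) (cs : List Char) : List Int :=
  let st := cs.foldl (extractStemsStepA min_length) (stems, cur)
  if st.2 ≥ min_length then st.1 ++ [st.2] else st.1

-- run lengths (including empty runs) of '(' segments, with `cur` open '(' already seen
def extractStemsRuns : List Char → Nat → List Nat
  | [], cur => [cur]
  | c :: cs, cur => if c = '(' then extractStemsRuns cs (cur + 1) else cur :: extractStemsRuns cs 0

theorem finishA_nil (ml : Int) (stems : List Int) (cur : Int) :
    extractStemsFinishA ml stems cur [] = if ml ≤ cur then stems ++ [cur] else stems := by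
  simp [extractStemsFinishA, ge_iff_le]

theorem finishA_cons (ml : Int) (stems : List Int) (cur : Int) (c : Char) (cs : List Char) :
    extractStemsFinishA ml stems cur (c :: cs) =
      if c = '(' then extractStemsFinishA ml stems (cur + 1) cs
      else extractStemsFinishA ml (if ml ≤ cur then stems ++ [cur] else stems) 0 cs := by
  by_cases hc : c = '(' <;> by_cases hp : c = ')' <;>
    simp [extractStemsFinishA, extractStemsStepA, hc, hp, ge_iff_le]

theorem extractStemsSplit_ne_nil : ∀ cs : List Char, extractStemsSplit cs ≠ [] := by
  intro cs
  cases cs with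
  | nil => simp [extractStemsSplit]
  | cons c cs =>
    simp only [extractStemsSplit]
    split
    · cases h : extractStemsSplit cs <;> simp
    · simp

theorem runs_eq_split : ∀ (cs : List Char) (cur : Nat),
    extractStemsRuns cs cur =
      match extractStemsSplit cs with
      | [] => []
      | seg :: rest => (cur + seg.length) :: rest.map List.length := by
  intro cs
  induction cs with
  | nil => intro cur; simp [extractStemsRuns, extractStemsSplit]
  | cons c cs ih =>
    intro cur
    by_cases hc : c = '('
    · cases h : extractStemsSplit cs with
      | nil => exact absurd h (extractStemsSplit_ne_nil cs)
      | cons seg rest =>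
        simp only [extractStemsRuns, extractStemsSplit, hc, if_pos, h, ih (cur + 1)]
        refine congrArg (fun n => n :: List.map List.length rest) ?_
        simp only [List.length_cons]
        omega
    · simp only [extractStemsRuns, extractStemsSplit, if_neg hc]
      cases h : extractStemsSplit cs with
      | nil => exact absurd h (extractStemsSplit_ne_nil cs)
      | cons seg rest =>
        have := ih 0
        rw [h] at this
        simp [this]

theorem foldA_runs (min_length : Int) : ∀ (cs : List Char) (stems : List Int) (cur : Nat),
    extractStemsFinishA min_length stems (cur : Int) cs =
    stems ++ ((extractStemsRuns cs cur).filter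
        (fun (n : Nat) => decide (min_length ≤ (n : Int)))).map (fun (n : Nat) => (n : Int)) := by
  intro cs
  induction cs with
  | nil =>
    intro stems cur
    rw [finishA_nil]
    by_cases h : min_length ≤ (cur : Int) <;> simp [extractStemsRuns, h]
  | cons c cs ih =>
    intro stems cur
    rw [finishA_cons]
    by_cases hc : c = '('
    · rw [if_pos hc]
      have hcast : ((cur : Int) + 1) = ((cur + 1 : Nat) : Int) := by push_cast; ring
      rw [hcast, ih stems (cur + 1)]
      simp [extractStemsRuns, hc]
    · rw [if_neg hc]
      have hruns : extractStemsRuns (c :: cs) cur = cur :: extractStemsRuns cs 0 := by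
        simp [extractStemsRuns, hc]
      rw [hruns]
      by_cases h : min_length ≤ (cur : Int)
      · rw [if_pos h]
        have := ih (stems ++ [(cur : Int)]) 0
        rw [Nat.cast_zero] at this
        rw [this]
        simp [h]
      · rw [if_neg h]
        have := ih stems 0
        rw [Nat.cast_zero] at this
        rw [this]
        simp [h]

theorem map_cast_filter (ml : Int) : ∀ (l : List (List Char)),
    ((l.map List.length).filter (fun (n : Nat) => decide (ml ≤ (n : Int)))).map (fun (n : Nat) => (n : Int)) =
      (l.filter (fun seg => decide (ml ≤ (seg.length : Int)))).map
        (fun seg => ((seg.length : Int))) := by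
  intro l
  induction l with
  | nil => rfl
  | cons seg rest ih =>
    simp only [List.map_cons, List.filter_cons, decide_eq_true_eq]
    split_ifs with h
    · rw [List.map_cons, ih, List.map_cons]
    · rw [ih]

-- ===== VERDICT (by name: the statement is the Claim_ definition above) =====
theorem extract_stems_py_spec : Claim_equal_extract_stems_py := by
  intro structure_ min_length _
  unfold Spec_extract_stems_py extract_stems_py extract_stems_py_alt
  have h := foldA_runs min_length structure_.toList [] 0
  rw [Nat.cast_zero] at h
  rw [show
      (let st := structure_.toList.foldl (extractStemsStepA min_length) ([], 0)
       if st.2 ≥ min_length then st.1 ++ [st.2] else st.1) =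
      extractStemsFinishA min_length [] 0 structure_.toList from rfl, h,
    runs_eq_split structure_.toList 0]
  cases hs : extractStemsSplit structure_.toList with
  | nil => exact absurd hs (extractStemsSplit_ne_nil _)
  | cons seg rest =>
    rw [List.nil_append]
    have : ((0 + seg.length : Nat) :: rest.map List.length) =
        (seg :: rest).map List.length := by simp
    rw [show (match seg :: rest with
        | [] => ([] : List Nat)
        | seg :: rest => (0 + seg.length) :: rest.map List.length) =
        ((0 + seg.length : Nat) :: rest.map List.length) from rfl,
      this, map_cast_filter]
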